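-- pv_equiv track=rewrite | github.com/jianyingzhihe/multimodel_rog | src/predict/prediction_parse.py | parse_input_field
-- ===== SOURCE A (Python) =====
-- def parse_input_field(input_str):
--     lines = input_str.strip().split('\n')
--
--     result = {
--         "predicted_paths": [],
--         "ground_truth_paths": []
--     }
--
--     current_section = None  # 可以是 'predicted' 或 'ground_truth'
--
--     for line in lines:
--         line = line.strip()
--         if line.startswith("Predicted Paths:"):
--             current_section = "predicted"
--         elif line.startswith("Ground Truth Paths:"):
--             current_section = "ground_truth"
--         elif line.startswith("Path"):
--             path_part = line.split(":", 1)[1].strip()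
--             nodes = [x.strip() for x in path_part.split("->")]
--
--             if current_section == "predicted":
--                 result["predicted_paths"].append(nodes)
--             elif current_section == "ground_truth":
--                 result["ground_truth_paths"].append(nodes)
--
--     return result
-- ===== SOURCE B (Python) =====
-- def _split_body(lines):
--     # lines of a section up to (but not including) the next header, plus the rest
--     body = []
--     for i, ln in enumerate(lines):
--         if ln.startswith("Predicted Paths:") or ln.startswith("Ground Truth Paths:"):
--             return body, lines[i:]
--         body.append(ln)
--     return body, []
--
--
-- def _sections(lines):
--     # header-delimited sections as (name, body_lines); lines before any header dropped
--     if not lines: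
--         return []
--     head, rest = lines[0], lines[1:]
--     if head.startswith("Predicted Paths:"):
--         body, tail = _split_body(rest)
--         return [("predicted", body)] + _sections(tail)
--     if head.startswith("Ground Truth Paths:"):
--         body, tail = _split_body(rest)
--         return [("ground_truth", body)] + _sections(tail)
--     return _sections(rest)
--
--
-- def _parse_paths(lines):
--     return [[x.strip() for x in ln.split(":", 1)[1].strip().split("->")]
--             for ln in lines if ln.startswith("Path")]
--
--
-- def parse_input_field(input_str):
--     lines = [ln.strip() for ln in input_str.strip().split('\n')]
--     secs = _sections(lines)
--     pred = [p for name, body in secs if name == "predicted" for p in _parse_paths(body)]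
--     gt = [p for name, body in secs if name == "ground_truth" for p in _parse_paths(body)]
--     return {"predicted_paths": pred, "ground_truth_paths": gt}
-- ===== Notes on version B (the rewrite author's own statement) =====
-- stated objective: alternative
-- what changed: A's single line loop with a current_section state variable is replaced by a two-phase decomposition: first split the stripped lines into header-delimited (name, body) sections via a recursive splitter (preamble lines dropped), then collect the parsed Path lines of the predicted / ground-truth sections with two comprehensions.
import Mathlib
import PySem

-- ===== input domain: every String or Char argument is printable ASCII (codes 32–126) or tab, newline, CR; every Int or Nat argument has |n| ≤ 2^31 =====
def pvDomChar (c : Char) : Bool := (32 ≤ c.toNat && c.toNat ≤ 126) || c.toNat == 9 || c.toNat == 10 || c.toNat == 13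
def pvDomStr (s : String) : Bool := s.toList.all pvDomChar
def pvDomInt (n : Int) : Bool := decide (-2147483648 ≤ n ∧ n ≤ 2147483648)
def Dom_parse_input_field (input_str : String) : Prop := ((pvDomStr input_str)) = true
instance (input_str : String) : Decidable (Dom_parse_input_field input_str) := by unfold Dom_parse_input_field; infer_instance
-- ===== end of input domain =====

-- B re-decomposes A's single stateful line loop into two phases (split into header-delimited
-- sections, then parse each section's Path lines); same return value on Pre_ (alternative, not faster).

-- shared line tests / node parser: these literal Python expressions occur in both A and B
def pvIsPred (l : String) : Bool := PySem.Str.startswith l "Predicted Paths:"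
def pvIsGT (l : String) : Bool := PySem.Str.startswith l "Ground Truth Paths:"
def pvIsPath (l : String) : Bool := PySem.Str.startswith l "Path"

-- '[x.strip() for x in line.split(":", 1)[1].strip().split("->")]' — shared by both Pythons verbatim.
-- Python raises IndexError when the line has no ':' (split gives one piece); Pre_ excludes that,
-- so the '.getD ""' default is never relied on inside a section.
def pvNodes (l : String) : List String :=
  let parts := (PySem.Str.splitMax? l ":" 1).getD []
  let pathPart := PySem.Str.strip ((PySem.List.pyGet? parts 1).getD "")
  ((PySem.Str.split? pathPart "->").getD []).map PySem.Str.strip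

-- ===== PORT A =====
-- one iteration of A's for-loop, after 'line = line.strip()'; state = (current_section, result-dict values)
def pvStepA (st : Option String × List (List String) × List (List String)) (l : String) :
    Option String × List (List String) × List (List String) :=
  if pvIsPred l then (some "predicted", st.2)
  else if pvIsGT l then (some "ground_truth", st.2)
  else if pvIsPath l then
    let nodes := pvNodes l
    if st.1 = some "predicted" then (st.1, st.2.1 ++ [nodes], st.2.2)
    else if st.1 = some "ground_truth" then (st.1, st.2.1, st.2.2 ++ [nodes])
    else st
  else st

def parse_input_field (input_str : String) : List (String × List (List String)) :=
  let lines := (PySem.Str.split? (PySem.Str.strip input_str) "\n").getD []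
  let st := lines.foldl (fun st line => pvStepA st (PySem.Str.strip line)) (none, [], [])
  [("predicted_paths", st.2.1), ("ground_truth_paths", st.2.2)]

-- ===== PORT B =====
def pvIsHeader (l : String) : Bool := pvIsPred l || pvIsGT l

-- _split_body: section body up to the next header, plus the remaining lines
def pvSplitBody : List String → List String × List String
  | [] => ([], [])
  | l :: ls =>
    if pvIsHeader l then ([], l :: ls)
    else
      let p := pvSplitBody ls
      (l :: p.1, p.2)

-- _sections, with fuel (≥ number of lines) only to make the recursion structural;
-- the remainder returned by pvSplitBody is a suffix, so the fuel never runs out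
def pvSectionsF : Nat → List String → List (String × List String)
  | 0, _ => []
  | _ + 1, [] => []
  | n + 1, l :: ls =>
    if pvIsPred l then
      let p := pvSplitBody ls
      ("predicted", p.1) :: pvSectionsF n p.2
    else if pvIsGT l then
      let p := pvSplitBody ls
      ("ground_truth", p.1) :: pvSectionsF n p.2
    else pvSectionsF n ls

def pvSections (ls : List String) : List (String × List String) := pvSectionsF ls.length ls

-- _parse_paths: comprehension over a section's lines
def pvParsePaths (ls : List String) : List (List String) :=
  (ls.filter pvIsPath).map pvNodes

-- the two comprehensions over the section list
def pvGather (name : String) (secs : List (String × List String)) : List (List String) :=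
  (secs.filter (fun s => s.1 = name)).flatMap (fun s => pvParsePaths s.2)

def parse_input_field_alt (input_str : String) : List (String × List (List String)) :=
  let lines := ((PySem.Str.split? (PySem.Str.strip input_str) "\n").getD []).map PySem.Str.strip
  let secs := pvSections lines
  [("predicted_paths", pvGather "predicted" secs), ("ground_truth_paths", pvGather "ground_truth" secs)]

-- ===== PRECONDITION & SPEC =====
-- Pre_ excludes exactly the inputs where Python A raises IndexError: a stripped line that
-- starts with "Path" but contains no ':'.
def Pre_parse_input_field (input_str : String) : Prop :=
  ∀ line ∈ (PySem.Str.split? (PySem.Str.strip input_str) "\n").getD [],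
    pvIsPath (PySem.Str.strip line) = true →
    PySem.Str.isIn ":" (PySem.Str.strip line) = true
instance (input_str : String) : Decidable (Pre_parse_input_field input_str) := by
  unfold Pre_parse_input_field; infer_instance

def pvWitness_parse_input_field : String :=
  "Predicted Paths:\nPath 1: a -> b\nGround Truth Paths:\nPath 1: a"

def Spec_parse_input_field (input_str : String) (out : List (String × List (List String))) : Prop := out = parse_input_field_alt input_str
instance (input_str : String) (out : List (String × List (List String))) : Decidable (Spec_parse_input_field input_str out) := by unfold Spec_parse_input_field; infer_instance

-- ===== CLAIM (what is proved, stated in full; the proofs are below) =====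
def Claim_equal_parse_input_field : Prop := ∀ (input_str : String), Dom_parse_input_field input_str → Pre_parse_input_field input_str → Spec_parse_input_field input_str (parse_input_field input_str)

-- ===== LEMMAS AND PROOFS =====

theorem pvSplitBody_snd_length : ∀ ls : List String, (pvSplitBody ls).2.length ≤ ls.length := by
  intro ls
  induction ls with
  | nil => simp [pvSplitBody]
  | cons l ls ih =>
    simp only [pvSplitBody]
    split
    · simp
    · simpa using Nat.le_succ_of_le ih

theorem pvSectionsF_congr : ∀ n : Nat, ∀ ls : List String, ls.length ≤ n →
    pvSectionsF n ls = pvSections ls := by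
  intro n
  induction n using Nat.strong_induction_on with
  | _ n ih =>
    intro ls hlen
    match n, ls with
    | 0, [] => rfl
    | _ + 1, [] => rfl
    | n + 1, l :: ls =>
      have hsb : (pvSplitBody ls).2.length ≤ ls.length := pvSplitBody_snd_length ls
      have hlsn : ls.length ≤ n := Nat.lt_succ_iff.mp (by simpa using hlen)
      have h1 : pvSectionsF n (pvSplitBody ls).2 = pvSections (pvSplitBody ls).2 :=
        ih n (Nat.lt_succ_self n) _ (le_trans hsb hlsn)
      have h2 : pvSectionsF ls.length (pvSplitBody ls).2 = pvSections (pvSplitBody ls).2 :=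
        ih ls.length (Nat.lt_succ_of_le hlsn) _ hsb
      have h3 : pvSectionsF n ls = pvSections ls := ih n (Nat.lt_succ_self n) ls hlsn
      show pvSectionsF (n + 1) (l :: ls) = pvSectionsF (l :: ls).length (l :: ls)
      simp only [List.length_cons, pvSectionsF]
      rw [h1, h2, h3]
      rfl

theorem pvSections_cons (l : String) (ls : List String) :
    pvSections (l :: ls) =
      if pvIsPred l then ("predicted", (pvSplitBody ls).1) :: pvSections (pvSplitBody ls).2
      else if pvIsGT l then ("ground_truth", (pvSplitBody ls).1) :: pvSections (pvSplitBody ls).2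
      else pvSections ls := by
  show pvSectionsF (l :: ls).length (l :: ls) = _
  simp only [List.length_cons, pvSectionsF]
  rw [pvSectionsF_congr ls.length _ (pvSplitBody_snd_length ls),
      pvSectionsF_congr ls.length ls (le_refl _)]

-- sections as seen from A's loop state: an open section 'c' absorbs lines up to the next header
def pvSecsC : Option String → List String → List (String × List String)
  | none, ls => pvSections ls
  | some s, ls => (s, (pvSplitBody ls).1) :: pvSections (pvSplitBody ls).2

theorem pvParsePaths_cons (l : String) (ls : List String) :
    pvParsePaths (l :: ls) =
      if pvIsPath l then pvNodes l :: pvParsePaths ls else pvParsePaths ls := by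
  simp only [pvParsePaths, List.filter_cons]
  split <;> simp_all

theorem pvGather_cons (name s : String) (b : List String) (secs : List (String × List String)) :
    pvGather name ((s, b) :: secs) =
      (if s = name then pvParsePaths b else []) ++ pvGather name secs := by
  simp only [pvGather, List.filter_cons]
  split <;> simp_all

-- main invariant: A's fold from state (c, pred, gt) appends exactly what B extracts from pvSecsC c
theorem pvMain : ∀ (ls : List String) (c : Option String) (pred gt : List (List String)),
    (ls.foldl pvStepA (c, pred, gt)).2 =
      (pred ++ pvGather "predicted" (pvSecsC c ls),
       gt ++ pvGather "ground_truth" (pvSecsC c ls)) := by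
  intro ls
  induction ls with
  | nil =>
    intro c pred gt
    cases c with
    | none => simp [pvSecsC, pvSections, pvSectionsF, pvGather]
    | some s =>
      simp only [List.foldl_nil, pvSecsC, pvSplitBody, pvGather_cons]
      by_cases hs : s = "predicted" <;> by_cases hg : s = "ground_truth" <;>
        simp_all [pvSections, pvSectionsF, pvGather, pvParsePaths]
  | cons l ls ih =>
    intro c pred gt
    simp only [List.foldl_cons]
    by_cases hp : pvIsPred l = true
    · have hstep : pvStepA (c, pred, gt) l = (some "predicted", pred, gt) := by
        simp [pvStepA, hp]
      rw [hstep, ih]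
      cases c with
      | none => simp [pvSecsC, pvSections_cons, hp]
      | some s =>
        simp [pvSecsC, pvSections_cons, pvSplitBody, pvIsHeader, hp, pvGather_cons, pvParsePaths]
    · by_cases hg : pvIsGT l = true
      · have hstep : pvStepA (c, pred, gt) l = (some "ground_truth", pred, gt) := by
          simp [pvStepA, hp, hg]
        rw [hstep, ih]
        cases c with
        | none => simp [pvSecsC, pvSections_cons, hp, hg]
        | some s =>
          simp [pvSecsC, pvSections_cons, pvSplitBody, pvIsHeader, hp, hg, pvGather_cons, pvParsePaths]
      · -- l is not a header
        have hnh : pvIsHeader l = false := by simp [pvIsHeader, hp, hg]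
        cases c with
        | none =>
          have hstep : pvStepA ((none : Option String), pred, gt) l = (none, pred, gt) := by
            simp only [pvStepA, hp, hg]
            split <;> simp_all
          rw [hstep, ih]
          simp [pvSecsC, pvSections_cons, hp, hg]
        | some s =>
          have hbody : pvSecsC (some s) (l :: ls) =
              (s, l :: (pvSplitBody ls).1) :: pvSections (pvSplitBody ls).2 := by
            simp [pvSecsC, pvSplitBody, hnh]
          by_cases hpath : pvIsPath l = true
          · by_cases hsp : s = "predicted"
            · have hstep : pvStepA (some s, pred, gt) l = (some s, pred ++ [pvNodes l], gt) := by
                simp [pvStepA, hp, hg, hpath, hsp]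
              rw [hstep, ih, hbody]
              simp [pvSecsC, pvGather_cons, pvParsePaths_cons, hpath, hsp]
            · by_cases hsg : s = "ground_truth"
              · have hstep : pvStepA (some s, pred, gt) l = (some s, pred, gt ++ [pvNodes l]) := by
                  simp [pvStepA, hp, hg, hpath, hsg]
                rw [hstep, ih, hbody]
                simp [pvSecsC, pvGather_cons, pvParsePaths_cons, hpath, hsg]
              · have hstep : pvStepA (some s, pred, gt) l = (some s, pred, gt) := by
                  simp [pvStepA, hp, hg, hpath, hsp, hsg]
                rw [hstep, ih, hbody]
                simp [pvSecsC, pvGather_cons, hsp, hsg]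
          · have hstep : pvStepA (some s, pred, gt) l = (some s, pred, gt) := by
              simp [pvStepA, hp, hg, hpath]
            rw [hstep, ih, hbody]
            simp [pvSecsC, pvGather_cons, pvParsePaths_cons, hpath]

theorem pvEqAll (input_str : String) :
    parse_input_field input_str = parse_input_field_alt input_str := by
  have key : ∀ lines : List String,
      (lines.foldl (fun st line => pvStepA st (PySem.Str.strip line)) (none, [], [])).2 =
        (pvGather "predicted" (pvSections (lines.map PySem.Str.strip)),
         pvGather "ground_truth" (pvSections (lines.map PySem.Str.strip))) := by
    intro lines
    have h := pvMain (lines.map PySem.Str.strip) none [] []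
    rw [List.foldl_map] at h
    simpa [pvSecsC] using h
  unfold parse_input_field parse_input_field_alt
  simp only [key]

-- ===== VERDICT (by name: the statement is the Claim_ definition above) =====
theorem parse_input_field_spec : Claim_equal_parse_input_field := by
  intro input_str _ _
  unfold Spec_parse_input_field
  exact pvEqAll input_str
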